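-- pv_equiv track=rewrite | github.com/lemmyhemmingway/adventofcode | 2015/python/day1.py | part1
-- ===== SOURCE A (Python) =====
-- def part1(data):
--     position = 0
--     for c in data:
--         if c == "(":
--             position += 1
--         elif c == ")":
--             position -= 1
--
--     return position
-- ===== SOURCE B (Python) =====
-- def part1(data):
--     return data.count("(") - data.count(")")
-- ===== Notes on version B (the rewrite author's own statement) =====
-- stated objective: idiomatic
-- what changed: Replaces the single accumulating Python-level loop with two independent str.count scans and a subtraction.
import Mathlib
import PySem

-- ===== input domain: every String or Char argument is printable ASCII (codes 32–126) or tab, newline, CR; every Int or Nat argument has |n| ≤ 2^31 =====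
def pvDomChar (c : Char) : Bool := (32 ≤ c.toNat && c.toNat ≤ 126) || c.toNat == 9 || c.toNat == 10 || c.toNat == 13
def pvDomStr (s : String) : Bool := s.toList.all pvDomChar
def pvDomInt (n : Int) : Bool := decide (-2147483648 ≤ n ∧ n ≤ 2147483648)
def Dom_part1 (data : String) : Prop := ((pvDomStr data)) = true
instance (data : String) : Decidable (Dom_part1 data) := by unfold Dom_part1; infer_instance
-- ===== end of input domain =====

-- B replaces A's single accumulating loop with two independent substring-count scans and a subtraction (idiomatic; same cost).

-- ===== PORT A =====
def part1 (data : String) : Int :=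
  data.toList.foldl
    (fun position c =>
      if c == '(' then position + 1
      else if c == ')' then position - 1
      else position) 0

-- ===== PORT B =====
def part1_alt (data : String) : Int :=
  (PySem.Str.count data "(" : Int) - (PySem.Str.count data ")" : Int)

-- ===== PRECONDITION & SPEC =====
def Spec_part1 (data : String) (out : Int) : Prop := out = part1_alt data
instance (data : String) (out : Int) : Decidable (Spec_part1 data out) := by unfold Spec_part1; infer_instance

-- ===== CLAIM (what is proved, stated in full; the proofs are below) =====
def Claim_equal_part1 : Prop := ∀ (data : String), Dom_part1 data → Spec_part1 data (part1 data)

-- ===== LEMMAS AND PROOFS =====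

-- count.go on a singleton needle counts occurrences of the character (given enough fuel)
theorem chars_count_go_singleton (c : Char) (s : List Char) (fuel acc : Nat)
    (h : s.length ≤ fuel) :
    PySem.Chars.count.go [c] fuel s acc = acc + s.count c := by
  induction s generalizing fuel acc with
  | nil => cases fuel <;> simp [PySem.Chars.count.go]
  | cons d t ih =>
    cases fuel with
    | zero => simp at h
    | succ f =>
      have hf : t.length ≤ f := by simp at h; omega
      by_cases hc : c = d
      · subst hc
        have h1 := ih f (acc + 1) hf
        simp [PySem.Chars.count.go, List.isPrefixOf, h1]
        omega
      · have h1 := ih f acc hf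
        have hb : (c == d) = false := by simp [hc]
        simp [PySem.Chars.count.go, List.isPrefixOf, hb, h1, Ne.symm hc]

-- Python s.count(single char) is the character count
theorem chars_count_singleton (c : Char) (s : List Char) :
    PySem.Chars.count s [c] = s.count c := by
  simp [PySem.Chars.count, chars_count_go_singleton c s s.length 0 le_rfl]

-- A's loop computes count '(' minus count ')'
theorem foldl_balance (l : List Char) (a : Int) :
    l.foldl (fun position c =>
      if c == '(' then position + 1
      else if c == ')' then position - 1
      else position) a = a + (l.count '(' : Int) - (l.count ')' : Int) := by
  induction l generalizing a with
  | nil => simp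
  | cons d t ih =>
    simp only [List.foldl_cons, ih, List.count_cons]
    by_cases h1 : d = '('
    · simp [h1]; ring
    · by_cases h2 : d = ')'
      · simp [h2]; ring
      · simp [h1, h2]

-- ===== VERDICT (by name: the statement is the Claim_ definition above) =====
theorem part1_spec : Claim_equal_part1 := by
  intro data _
  unfold Spec_part1 part1 part1_alt
  rw [foldl_balance]
  have h1 : PySem.Str.count data "(" = PySem.Chars.count data.toList ['('] := by
    simp [PySem.Str.count_eq]
  have h2 : PySem.Str.count data ")" = PySem.Chars.count data.toList [')'] := by
    simp [PySem.Str.count_eq]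
  rw [h1, h2, chars_count_singleton, chars_count_singleton]
  ring
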